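-- pv_equiv track=rewrite | github.com/helengracehuang/Algorithms-in-Bioinformatics | Assignment 2/Question 15.py | bw_getRank_ch
-- ===== SOURCE A (Python) =====
-- def bw_getRank_ch(index, nucleotide, encoded): # return the rank of "nucleotide" within the same characters
-- 	rank = 1 # base case
-- 	if index == 0:
-- 		return 1
-- 	if encoded[index-1]==nucleotide:
-- 		rank = bw_getRank_ch(index-1, nucleotide, encoded) + 1
-- 	else:
-- 		rank = bw_getRank_ch(index-1, nucleotide, encoded)
-- 	return rank
-- ===== SOURCE B (Python) =====
-- def bw_getRank_ch(index, nucleotide, encoded):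
--     # Iterative forward scan: running count over the prefix instead of recursion.
--     rank = 1
--     for i in range(index):
--         if encoded[i] == nucleotide:
--             rank += 1
--     return rank
-- ===== Notes on version B (the rewrite author's own statement) =====
-- stated objective: simpler
-- what changed: Replaces the top-down recursion (index down to 0) with a single forward loop keeping a running rank accumulator.
import Mathlib
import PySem

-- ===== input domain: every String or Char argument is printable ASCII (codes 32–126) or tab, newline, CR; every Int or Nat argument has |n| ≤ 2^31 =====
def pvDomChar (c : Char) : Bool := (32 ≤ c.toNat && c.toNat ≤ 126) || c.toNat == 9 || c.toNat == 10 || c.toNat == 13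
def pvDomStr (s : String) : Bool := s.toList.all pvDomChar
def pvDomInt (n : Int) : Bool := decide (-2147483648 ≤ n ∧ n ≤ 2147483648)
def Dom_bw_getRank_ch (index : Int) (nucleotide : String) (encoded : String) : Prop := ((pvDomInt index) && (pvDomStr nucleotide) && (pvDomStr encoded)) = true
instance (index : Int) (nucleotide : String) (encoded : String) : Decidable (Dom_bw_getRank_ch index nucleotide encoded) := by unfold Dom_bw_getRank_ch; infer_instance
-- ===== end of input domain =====

-- B replaces A's top-down recursion by a single forward loop with a running rank accumulator (simpler).

-- shared primitive: Python's `encoded[i] == nucleotide` (char at i, as a 1-char string, vs nucleotide)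
def bw_eqAt (nuc enc : List Char) (i : Int) : Bool :=
  match PySem.Chars.pyGet? enc i with
  | some c => nuc == [c]
  | none => false

-- ===== PORT A =====
-- A recurses from `index` down to 0; faithful on Pre_ (0 ≤ index ≤ len), where Python returns.
def bw_getRank_ch_go (nuc enc : List Char) : Nat → Int
  | 0 => 1
  | k+1 =>
    if bw_eqAt nuc enc (k : Int) then bw_getRank_ch_go nuc enc k + 1
    else bw_getRank_ch_go nuc enc k

def bw_getRank_ch (index : Int) (nucleotide : String) (encoded : String) : Int :=
  bw_getRank_ch_go nucleotide.toList encoded.toList index.toNat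

-- ===== PORT B =====
def bw_getRank_ch_alt (index : Int) (nucleotide : String) (encoded : String) : Int :=
  (PySem.List.pyRange 0 index 1).foldl
    (fun rank i => if bw_eqAt nucleotide.toList encoded.toList i then rank + 1 else rank) 1

-- ===== PRECONDITION & SPEC =====
-- Pre_: exactly the inputs on which Python A returns; outside it A raises IndexError
-- (negative index recurses past -len; index > len reads past the end).
def Pre_bw_getRank_ch (index : Int) (_nucleotide : String) (encoded : String) : Prop :=
  0 ≤ index ∧ index ≤ (encoded.toList.length : Int)

instance (index : Int) (nucleotide : String) (encoded : String) : Decidable (Pre_bw_getRank_ch index nucleotide encoded) := by unfold Pre_bw_getRank_ch; infer_instance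

def pvWitness_bw_getRank_ch : Int × String × String := (3, "a", "aba")

def Spec_bw_getRank_ch (index : Int) (nucleotide : String) (encoded : String) (out : Int) : Prop := out = bw_getRank_ch_alt index nucleotide encoded
instance (index : Int) (nucleotide : String) (encoded : String) (out : Int) : Decidable (Spec_bw_getRank_ch index nucleotide encoded out) := by unfold Spec_bw_getRank_ch; infer_instance

-- ===== CLAIM (what is proved, stated in full; the proofs are below) =====
def Claim_equal_bw_getRank_ch : Prop := ∀ (index : Int) (nucleotide : String) (encoded : String), Dom_bw_getRank_ch index nucleotide encoded → Pre_bw_getRank_ch index nucleotide encoded → Spec_bw_getRank_ch index nucleotide encoded (bw_getRank_ch index nucleotide encoded)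

-- ===== LEMMAS AND PROOFS =====

theorem bw_go_eq_foldl (nuc enc : List Char) (n : Nat) :
    bw_getRank_ch_go nuc enc n =
      (PySem.List.pyRange 0 (n : Int) 1).foldl
        (fun rank i => if bw_eqAt nuc enc i then rank + 1 else rank) 1 := by
  induction n with
  | zero => simp [bw_getRank_ch_go, PySem.List.pyRange_one_eq_nil]
  | succ k ih =>
    rw [show ((k+1 : Nat) : Int) = (k : Int) + 1 by push_cast; ring,
        PySem.List.pyRange_one_succ_right (Int.natCast_nonneg k),
        List.foldl_append]
    simp [bw_getRank_ch_go, ih]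

-- ===== VERDICT (by name: the statement is the Claim_ definition above) =====
theorem bw_getRank_ch_spec : Claim_equal_bw_getRank_ch := by
  intro index nucleotide encoded _ hpre
  unfold Spec_bw_getRank_ch bw_getRank_ch bw_getRank_ch_alt
  rw [bw_go_eq_foldl, Int.toNat_of_nonneg hpre.1]
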